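-- pv_equiv track=rewrite | github.com/JoKFA/MCP-Security-Framework | src/modules/detectors/excessive_permissions_detector.py | _find_param
-- ===== SOURCE A (Python) =====
-- from typing import List, Dict, Any, Optional, Set, Tuple
--
-- def _find_param(schema: Dict[str, Any], candidates: Set[str]) -> Optional[str]:
--     """Locate a parameter by name heuristic."""
--     properties = schema.get('properties', {})
--     for name in properties.keys():
--         if name.lower() in candidates:
--             return name
--     for name in properties.keys():
--         for candidate in candidates:
--             if candidate in name.lower():
--                 return name
--     return None
-- ===== SOURCE B (Python) =====
-- def _find_param(schema, candidates):
--     """Locate a parameter by name heuristic (single pass, pending first substring match)."""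
--     properties = schema.get('properties', {})
--     first_sub = None
--     for name in properties.keys():
--         low = name.lower()
--         if low in candidates:
--             return name
--         if first_sub is None and any(c in low for c in candidates):
--             first_sub = name
--     return first_sub
-- ===== Notes on version B (the rewrite author's own statement) =====
-- stated objective: alternative
-- what changed: Replaces A's two full scans over the property names by a single pass that returns immediately on an exact lower-case match and otherwise records the first substring match in a pending variable returned at the end.
import Mathlib
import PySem

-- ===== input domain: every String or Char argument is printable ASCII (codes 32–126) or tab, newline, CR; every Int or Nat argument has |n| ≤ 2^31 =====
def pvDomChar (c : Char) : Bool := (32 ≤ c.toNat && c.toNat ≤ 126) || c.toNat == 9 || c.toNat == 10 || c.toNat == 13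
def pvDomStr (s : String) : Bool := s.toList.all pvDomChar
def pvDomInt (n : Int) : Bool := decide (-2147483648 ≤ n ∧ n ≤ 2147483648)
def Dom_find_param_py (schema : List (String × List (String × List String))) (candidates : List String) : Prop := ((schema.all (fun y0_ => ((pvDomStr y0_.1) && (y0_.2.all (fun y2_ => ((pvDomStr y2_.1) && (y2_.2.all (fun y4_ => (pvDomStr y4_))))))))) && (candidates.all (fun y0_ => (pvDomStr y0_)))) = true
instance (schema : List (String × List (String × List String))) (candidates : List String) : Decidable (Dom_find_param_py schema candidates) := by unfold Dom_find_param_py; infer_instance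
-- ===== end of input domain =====

-- B folds A's two scans over the property names into a single pass carrying a pending first-substring-match variable (objective: alternative decomposition, same cost).


-- ===== PORT A =====
-- Literal port of A: properties = schema.get('properties', {}), then two passes with early return.
def find_param_py (schema : List (String × List (String × List String))) (candidates : List String) : Option String :=
  let properties := PySem.Dict.getD (PySem.Dict.mk schema) "properties" []
  match (PySem.Dict.keys (PySem.Dict.mk properties)).find?
      (fun name => PySem.Set.contains candidates (PySem.Str.lower name)) with
  | some name => some name
  | none =>
    -- second pass: inner loop over the set 'candidates' only tests existence of a hit
    -- (the returned value is 'name' regardless of which candidate hits), so it is order-independent: ported as .any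
    (PySem.Dict.keys (PySem.Dict.mk properties)).find?
      (fun name => candidates.any (fun candidate => PySem.Str.isIn candidate (PySem.Str.lower name)))

-- ===== PORT B =====
-- Port of B: one loop over the names carrying the pending first substring match 'firstSub'.
def findParamLoop (candidates : List String) : List String → Option String → Option String
  | [], firstSub => firstSub
  | name :: rest, firstSub =>
    let low := PySem.Str.lower name
    if PySem.Set.contains candidates low then some name
    else
      findParamLoop candidates rest
        (match firstSub with
         | some m => some m
         | none =>
           if candidates.any (fun c => PySem.Str.isIn c low) then some name else none)

def find_param_py_alt (schema : List (String × List (String × List String))) (candidates : List String) : Option String :=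
  findParamLoop candidates (PySem.Dict.keys (PySem.Dict.mk (PySem.Dict.getD (PySem.Dict.mk schema) "properties" []))) none

-- ===== PRECONDITION & SPEC =====
def Spec_find_param_py (schema : List (String × List (String × List String))) (candidates : List String) (out : Option String) : Prop := out = find_param_py_alt schema candidates
instance (schema : List (String × List (String × List String))) (candidates : List String) (out : Option String) : Decidable (Spec_find_param_py schema candidates out) := by unfold Spec_find_param_py; infer_instance

-- ===== CLAIM (what is proved, stated in full; the proofs are below) =====
def Claim_equal_find_param_py : Prop := ∀ (schema : List (String × List (String × List String))) (candidates : List String), Dom_find_param_py schema candidates → Spec_find_param_py schema candidates (find_param_py schema candidates)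

-- ===== LEMMAS AND PROOFS =====

-- ===== VERDICT (by name: the statement is the Claim_ definition above) =====
-- Invariant of B's single loop: it equals "first exact match, else the pending acc, else first substring match".
theorem findParamLoop_eq (candidates : List String) (ks : List String) (acc : Option String) :
    findParamLoop candidates ks acc =
      match ks.find? (fun n => PySem.Set.contains candidates (PySem.Str.lower n)) with
      | some n => some n
      | none =>
        match acc with
        | some m => some m
        | none => ks.find? (fun n => candidates.any (fun c => PySem.Str.isIn c (PySem.Str.lower n))) := by
  induction ks generalizing acc with
  | nil => cases acc <;> rfl
  | cons n rest ih =>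
    simp only [findParamLoop, List.find?_cons]
    cases hp : PySem.Set.contains candidates (PySem.Str.lower n) with
    | true => simp
    | false =>
      simp only [Bool.false_eq_true, if_false]
      rw [ih]
      cases hq : candidates.any (fun c => PySem.Str.isIn c (PySem.Str.lower n)) <;>
        cases acc <;>
          cases hfp : rest.find? (fun n => PySem.Set.contains candidates (PySem.Str.lower n)) <;>
            simp

theorem find_param_py_spec : Claim_equal_find_param_py := by
  intro schema candidates _
  unfold Spec_find_param_py find_param_py find_param_py_alt
  rw [findParamLoop_eq]
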